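-- pv_equiv track=rewrite | github.com/Dr-Infernal/Thoth | dream_cycle.py | _prepare_enrichment_inputs
-- ===== SOURCE A (Python) =====
-- def _find_thin_entities(batch: list[dict], min_chars: int) -> list[dict]:
--     """Find entities with descriptions shorter than min_chars."""
--     return [e for e in batch if len(e.get("description", "") or "") < min_chars]
--
-- def _collect_other_subjects(entity_id: str | None, all_entities: list[dict] | None = None) -> set[str]:
--     """Build a set of lowercased subject names for all entities EXCEPT *entity_id*.
--
--     Used by the post-enrichment validator to detect cross-entity fact-bleed.
--     """
--     if all_entities is None:
--         import knowledge_graph as kg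
--         all_entities = kg.list_entities(limit=100_000)
--
--     others: set[str] = set()
--     for e in all_entities:
--         if entity_id and e["id"] == entity_id:
--             continue
--         subj = (e.get("subject", "") or "").strip().lower()
--         if subj and len(subj) >= 3 and subj != "user":
--             others.add(subj)
--         for alias in (e.get("aliases", "") or "").split(","):
--             alias = alias.strip().lower()
--             if alias and len(alias) >= 3 and alias != "user":
--                 others.add(alias)
--     return others
--
-- def _prepare_enrichment_inputs(
--     all_entities: list[dict],
--     merges: list[dict],
--     min_chars: int,
-- ) -> tuple[list[dict], set[str]]:
--     """Prepare Phase 2 enrichment candidates and validation guardrails."""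
--     merged_ids = {
--         item.get("duplicate_id")
--         for item in merges
--         if item.get("duplicate_id")
--     }
--     surviving_entities = [
--         entity for entity in all_entities
--         if entity["id"] not in merged_ids
--     ]
--     thin_entities = _find_thin_entities(surviving_entities, min_chars)
--     thin_entities.sort(key=lambda entity: entity.get("updated_at", ""))
--     other_subjects = _collect_other_subjects(None, surviving_entities)
--     return thin_entities[:20], other_subjects
-- ===== SOURCE B (Python) =====
-- def _add_terms(others, e):
--     subj = (e.get("subject", "") or "").strip().lower()
--     if subj and len(subj) >= 3 and subj != "user":
--         others.add(subj)
--     for alias in (e.get("aliases", "") or "").split(","):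
--         alias = alias.strip().lower()
--         if alias and len(alias) >= 3 and alias != "user":
--             others.add(alias)
--
-- def _prepare_enrichment_inputs(all_entities, merges, min_chars):
--     """Single fused pass over all_entities instead of three list traversals."""
--     merged_ids = {
--         item.get("duplicate_id")
--         for item in merges
--         if item.get("duplicate_id")
--     }
--     thin = []
--     others = set()
--     for e in all_entities:
--         if e["id"] in merged_ids:
--             continue
--         _add_terms(others, e)
--         if len(e.get("description", "") or "") < min_chars:
--             thin.append(e)
--     thin.sort(key=lambda e: e.get("updated_at", ""))
--     return thin[:20], others
-- ===== Notes on version B (the rewrite author's own statement) =====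
-- stated objective: simpler
-- what changed: Replaces A's three separate passes (filter surviving, filter thin, collect subjects via a helper taking an entity_id filter) with one fused loop over all_entities that skips merged ids and builds the thin list and the subject set together, inlining the subject/alias cleaning.
import Mathlib
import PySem

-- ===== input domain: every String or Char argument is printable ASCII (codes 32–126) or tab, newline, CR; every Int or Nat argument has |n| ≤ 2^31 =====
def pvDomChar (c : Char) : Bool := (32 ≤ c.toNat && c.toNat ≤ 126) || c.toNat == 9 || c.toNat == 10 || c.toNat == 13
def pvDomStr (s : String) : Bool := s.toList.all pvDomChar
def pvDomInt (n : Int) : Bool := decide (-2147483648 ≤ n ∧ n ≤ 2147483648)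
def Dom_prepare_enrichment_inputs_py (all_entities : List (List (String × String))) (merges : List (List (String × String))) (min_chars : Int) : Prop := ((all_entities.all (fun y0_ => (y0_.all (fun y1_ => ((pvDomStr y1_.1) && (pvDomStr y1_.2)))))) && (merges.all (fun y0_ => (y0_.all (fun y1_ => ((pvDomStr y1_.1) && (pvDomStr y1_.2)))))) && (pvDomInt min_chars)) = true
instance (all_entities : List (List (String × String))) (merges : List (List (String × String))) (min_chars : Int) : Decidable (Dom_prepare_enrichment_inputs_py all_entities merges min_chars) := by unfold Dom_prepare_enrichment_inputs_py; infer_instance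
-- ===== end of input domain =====

-- B fuses A's three passes over the surviving entities into one loop over all_entities
-- (objective: simpler — one traversal building the thin list and the subject set together).

-- Python dicts arrive as association lists; lookup is the FIRST matching key (dict semantics).
def pvGet (e : List (String × String)) (k : String) : Option String :=
  (e.find? (fun p => p.1 == k)).map (·.2)

-- e.get(k, "") or "" — values are strings, so `or ""` only maps "" to itself.
def pvGetD (e : List (String × String)) (k : String) : String :=
  (pvGet e k).getD ""

-- ===== PORT A =====

-- [e for e in batch if len(e.get("description","") or "") < min_chars]
def find_thin_entities (batch : List (List (String × String))) (min_chars : Int) : List (List (String × String)) :=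
  batch.filter (fun e => decide (PySem.Str.len (pvGetD e "description") < min_chars))

-- _collect_other_subjects (entity_id may be None; A calls it with None)
def collect_other_subjects (entity_id : Option String) (all_entities : List (List (String × String))) : PySem.Set String :=
  all_entities.foldl (fun others e =>
    if (match entity_id with
        | some eid => eid != "" && (pvGetD e "id" == eid)
        | none => false) then others
    else
      let subj := PySem.Str.lower (PySem.Str.strip (pvGetD e "subject"))
      let others := if subj != "" && decide (3 ≤ PySem.Str.len subj) && subj != "user"
                    then PySem.Set.add others subj else others
      ((PySem.Str.split? (pvGetD e "aliases") ",").getD []).foldl (fun others al =>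
        let al := PySem.Str.lower (PySem.Str.strip al)
        if al != "" && decide (3 ≤ PySem.Str.len al) && al != "user"
        then PySem.Set.add others al else others) others)
    PySem.Set.empty

def prepare_enrichment_inputs_py (all_entities : List (List (String × String))) (merges : List (List (String × String))) (min_chars : Int) : (List (List (String × String))) × List String :=
  let merged_ids : PySem.Set String :=
    PySem.Set.ofList (merges.filterMap (fun item =>
      match pvGet item "duplicate_id" with
      | some s => if s = "" then none else some s
      | none => none))
  let surviving := all_entities.filter (fun e => !(PySem.Set.contains merged_ids (pvGetD e "id")))
  let thin := find_thin_entities surviving min_chars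
  let thin := PySem.List.sorted thin (fun e => pvGetD e "updated_at") false
  let others := collect_other_subjects none surviving
  (PySem.List.slice thin none (some 20), others)

-- ===== PORT B =====

-- Source B's _add_terms: clean subject and comma-split aliases into the set
def pvAddTerms (others : PySem.Set String) (e : List (String × String)) : PySem.Set String :=
  let subj := PySem.Str.lower (PySem.Str.strip (pvGetD e "subject"))
  let others := if subj != "" && decide (3 ≤ PySem.Str.len subj) && subj != "user"
                then PySem.Set.add others subj else others
  ((PySem.Str.split? (pvGetD e "aliases") ",").getD []).foldl (fun others al =>
    let al := PySem.Str.lower (PySem.Str.strip al)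
    if al != "" && decide (3 ≤ PySem.Str.len al) && al != "user"
    then PySem.Set.add others al else others) others

-- Source B's fused loop body
def pvStepB (merged_ids : PySem.Set String) (min_chars : Int)
    (acc : List (List (String × String)) × PySem.Set String) (e : List (String × String)) :
    List (List (String × String)) × PySem.Set String :=
  if PySem.Set.contains merged_ids (pvGetD e "id") then acc
  else
    let others := pvAddTerms acc.2 e
    let thin := if decide (PySem.Str.len (pvGetD e "description") < min_chars)
                then acc.1 ++ [e] else acc.1
    (thin, others)

def prepare_enrichment_inputs_py_alt (all_entities : List (List (String × String))) (merges : List (List (String × String))) (min_chars : Int) : (List (List (String × String))) × List String :=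
  let merged_ids : PySem.Set String :=
    PySem.Set.ofList (merges.filterMap (fun item =>
      match pvGet item "duplicate_id" with
      | some s => if s = "" then none else some s
      | none => none))
  let acc := all_entities.foldl (pvStepB merged_ids min_chars) ([], PySem.Set.empty)
  (PySem.List.slice (PySem.List.sorted acc.1 (fun e => pvGetD e "updated_at") false) none (some 20), acc.2)

-- ===== PRECONDITION & SPEC =====
-- Pre_: every entity has an "id" key — Python A raises KeyError on entity["id"] otherwise.
def Pre_prepare_enrichment_inputs_py (all_entities : List (List (String × String))) (merges : List (List (String × String))) (min_chars : Int) : Prop :=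
  all_entities.all (fun e => e.any (fun p => p.1 == "id")) = true
instance (all_entities : List (List (String × String))) (merges : List (List (String × String))) (min_chars : Int) : Decidable (Pre_prepare_enrichment_inputs_py all_entities merges min_chars) := by unfold Pre_prepare_enrichment_inputs_py; infer_instance

def pvWitness_prepare_enrichment_inputs_py : (List (List (String × String))) × (List (List (String × String))) × Int :=
  ([[("id", "a"), ("subject", "Alice"), ("description", "x")]], [[("duplicate_id", "b")]], 5)

def Spec_prepare_enrichment_inputs_py (all_entities : List (List (String × String))) (merges : List (List (String × String))) (min_chars : Int) (out : (List (List (String × String))) × List String) : Prop := out = prepare_enrichment_inputs_py_alt all_entities merges min_chars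
instance (all_entities : List (List (String × String))) (merges : List (List (String × String))) (min_chars : Int) (out : (List (List (String × String))) × List String) : Decidable (Spec_prepare_enrichment_inputs_py all_entities merges min_chars out) := by unfold Spec_prepare_enrichment_inputs_py; infer_instance

-- ===== CLAIM (what is proved, stated in full; the proofs are below) =====
def Claim_equal_prepare_enrichment_inputs_py : Prop := ∀ (all_entities : List (List (String × String))) (merges : List (List (String × String))) (min_chars : Int), Dom_prepare_enrichment_inputs_py all_entities merges min_chars → Pre_prepare_enrichment_inputs_py all_entities merges min_chars → Spec_prepare_enrichment_inputs_py all_entities merges min_chars (prepare_enrichment_inputs_py all_entities merges min_chars)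

-- ===== LEMMAS AND PROOFS =====

-- With entity_id = None, A's collector body is exactly pvAddTerms.
theorem collect_none_eq_foldl (l : List (List (String × String))) :
    collect_other_subjects none l = l.foldl pvAddTerms PySem.Set.empty := rfl

-- B's fused loop equals A's two separate passes over the kept entities.
theorem stepB_loop (mi : PySem.Set String) (mc : Int) (l : List (List (String × String))) :
    ∀ (t : List (List (String × String))) (s : PySem.Set String),
    l.foldl (pvStepB mi mc) (t, s) =
      (t ++ (l.filter (fun e => !(PySem.Set.contains mi (pvGetD e "id")))).filter
              (fun e => decide (PySem.Str.len (pvGetD e "description") < mc)),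
       (l.filter (fun e => !(PySem.Set.contains mi (pvGetD e "id")))).foldl pvAddTerms s) := by
  induction l with
  | nil => intro t s; simp
  | cons e l ih =>
    intro t s
    by_cases h : pvGetD e "id" ∈ mi
    · simp [pvStepB, h, ih]
    · by_cases hd : ((pvGetD e "description").length : Int) < mc
      · simp [pvStepB, h, hd, ih]
      · simp [pvStepB, h, hd, ih]

theorem prepare_spec_aux (all_entities merges : List (List (String × String))) (min_chars : Int) :
    prepare_enrichment_inputs_py all_entities merges min_chars =
      prepare_enrichment_inputs_py_alt all_entities merges min_chars := by
  simp only [prepare_enrichment_inputs_py, prepare_enrichment_inputs_py_alt,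
    find_thin_entities, collect_none_eq_foldl, stepB_loop]
  simp

-- ===== VERDICT (by name: the statement is the Claim_ definition above) =====
theorem prepare_enrichment_inputs_py_spec : Claim_equal_prepare_enrichment_inputs_py := by
  intro all_entities merges min_chars _ _
  unfold Spec_prepare_enrichment_inputs_py
  exact prepare_spec_aux all_entities merges min_chars
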